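-- pv_equiv track=rewrite | github.com/TsarFox/mupen64plus-ui-console | mupen64debug/frontend.py | collapse_keystrokes
-- ===== SOURCE A (Python) =====
-- KEYSTROKE_TREE = {
--     # Initial terminals
--     "enter": "eval",
--     "backspace": "delete-backward-char",
--     "ctrl h": "help",
--     "ctrl e": "end-of-line",
--     "ctrl a": "beginning-of-line",
--     "ctrl n": "forward-hist",
--     "ctrl p": "backward-hist",
--     "ctrl f": "forward-char",
--     "ctrl b": "backward-char",
--
--     # Complex keystrokes
--     "ctrl x": {
--         "ctrl x": "exit-debugger",
--     }
-- }
--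
-- def collapse_keystrokes(keystrokes):
--     cur = KEYSTROKE_TREE
--     for keystroke in keystrokes:
--         cur = cur.get(keystroke, None)
--         if cur is None:
--             return None
--         if isinstance(cur, str):
--             return cur
--     return "incomplete"
-- ===== SOURCE B (Python) =====
-- # Flat table of complete keystroke paths -> commands, plus the set of internal
-- # prefixes; collapse_keystrokes grows a prefix tuple and indexes the table.
-- COMMANDS = {
--     ("enter",): "eval",
--     ("backspace",): "delete-backward-char",
--     ("ctrl h",): "help",
--     ("ctrl e",): "end-of-line",
--     ("ctrl a",): "beginning-of-line",
--     ("ctrl n",): "forward-hist",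
--     ("ctrl p",): "backward-hist",
--     ("ctrl f",): "forward-char",
--     ("ctrl b",): "backward-char",
--     ("ctrl x", "ctrl x"): "exit-debugger",
-- }
--
-- PREFIXES = {("ctrl x",)}
--
-- def collapse_keystrokes(keystrokes):
--     prefix = ()
--     for keystroke in keystrokes:
--         prefix += (keystroke,)
--         cmd = COMMANDS.get(prefix)
--         if cmd is not None:
--             return cmd
--         if prefix not in PREFIXES:
--             return None
--     return "incomplete"
-- ===== Notes on version B (the rewrite author's own statement) =====
-- stated objective: alternative
-- what changed: Replaces the nested-dict pointer walk with a precomputed flat table mapping complete keystroke paths to commands plus a set of internal prefixes, indexed by a growing prefix tuple.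
import Mathlib
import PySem

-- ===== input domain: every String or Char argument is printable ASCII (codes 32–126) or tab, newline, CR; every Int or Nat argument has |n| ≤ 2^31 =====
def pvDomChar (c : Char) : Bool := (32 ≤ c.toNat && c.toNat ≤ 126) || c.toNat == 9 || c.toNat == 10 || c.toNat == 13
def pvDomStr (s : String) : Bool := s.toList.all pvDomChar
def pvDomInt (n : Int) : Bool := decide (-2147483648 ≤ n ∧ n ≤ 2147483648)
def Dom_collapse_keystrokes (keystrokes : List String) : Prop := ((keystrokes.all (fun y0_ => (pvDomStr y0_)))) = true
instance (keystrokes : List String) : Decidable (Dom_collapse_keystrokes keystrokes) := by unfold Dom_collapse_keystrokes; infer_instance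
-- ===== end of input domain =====

-- B replaces A's nested-dict pointer walk with a precomputed flat table of complete
-- keystroke paths plus a prefix set, indexed by a growing prefix (objective: alternative).



-- ===== PORT A =====
-- Values of the nested keystroke tree: a terminal string or a sub-dict (inner
-- dicts of KEYSTROKE_TREE map strings to strings only, so one level suffices).
inductive KVal
  | str : String → KVal
  | sub : List (String × String) → KVal
deriving DecidableEq, Repr

def KEYSTROKE_TREE : PySem.Dict String KVal :=
  PySem.Dict.mk [("enter", .str "eval"),
   ("backspace", .str "delete-backward-char"),
   ("ctrl h", .str "help"),
   ("ctrl e", .str "end-of-line"),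
   ("ctrl a", .str "beginning-of-line"),
   ("ctrl n", .str "forward-hist"),
   ("ctrl p", .str "backward-hist"),
   ("ctrl f", .str "forward-char"),
   ("ctrl b", .str "backward-char"),
   ("ctrl x", .sub [("ctrl x", "exit-debugger")])]

-- the for-loop of A: thread `cur` (a dict node) through the keystroke list
def collapse_keystrokes_go (cur : PySem.Dict String KVal) (ks : List String) : Option String :=
  match ks with
  | [] => some "incomplete"
  | k :: rest =>
    match PySem.Dict.get? cur k with
    | none => none                      -- cur is None -> return None
    | some (KVal.str s) => some s           -- isinstance(cur, str) -> return cur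
    | some (KVal.sub d) => collapse_keystrokes_go (PySem.Dict.mk (d.map (fun p => (p.1, KVal.str p.2)))) rest

def collapse_keystrokes (keystrokes : List String) : Option String :=
  collapse_keystrokes_go KEYSTROKE_TREE keystrokes

-- ===== PORT B =====
def COMMANDS : PySem.Dict (List String) String :=
  PySem.Dict.mk [(["enter"], "eval"),
   (["backspace"], "delete-backward-char"),
   (["ctrl h"], "help"),
   (["ctrl e"], "end-of-line"),
   (["ctrl a"], "beginning-of-line"),
   (["ctrl n"], "forward-hist"),
   (["ctrl p"], "backward-hist"),
   (["ctrl f"], "forward-char"),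
   (["ctrl b"], "backward-char"),
   (["ctrl x", "ctrl x"], "exit-debugger")]

def PREFIXES : PySem.Set (List String) := PySem.Set.ofList [["ctrl x"]]

-- the for-loop of B: grow `prefix`, index the flat table
def collapse_keystrokes_alt_go (pfx : List String) (ks : List String) : Option String :=
  match ks with
  | [] => some "incomplete"
  | k :: rest =>
    let pfx' := pfx ++ [k]
    match PySem.Dict.get? COMMANDS pfx' with
    | some cmd => some cmd
    | none => if PREFIXES.contains pfx' then collapse_keystrokes_alt_go pfx' rest else none

def collapse_keystrokes_alt (keystrokes : List String) : Option String :=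
  collapse_keystrokes_alt_go [] keystrokes

-- ===== PRECONDITION & SPEC =====
def Spec_collapse_keystrokes (keystrokes : List String) (out : Option String) : Prop := out = collapse_keystrokes_alt keystrokes
instance (keystrokes : List String) (out : Option String) : Decidable (Spec_collapse_keystrokes keystrokes out) := by unfold Spec_collapse_keystrokes; infer_instance

-- ===== CLAIM (what is proved, stated in full; the proofs are below) =====
def Claim_equal_collapse_keystrokes : Prop := ∀ (keystrokes : List String), Dom_collapse_keystrokes keystrokes → Spec_collapse_keystrokes keystrokes (collapse_keystrokes keystrokes)

-- ===== LEMMAS AND PROOFS =====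

-- ===== VERDICT (by name: the statement is the Claim_ definition above) =====
set_option maxHeartbeats 2000000 in
theorem collapse_keystrokes_spec : Claim_equal_collapse_keystrokes := by
  intro ks _
  unfold Spec_collapse_keystrokes collapse_keystrokes collapse_keystrokes_alt
  cases ks with
  | nil => rfl
  | cons k rest =>
    by_cases h1 : "ctrl x" = k
    · cases h1
      cases rest with
      | nil => rfl
      | cons k2 rest2 =>
        by_cases h2 : "ctrl x" = k2
        · cases h2; rfl
        · simp [collapse_keystrokes_go, collapse_keystrokes_alt_go, KEYSTROKE_TREE, COMMANDS,
                PREFIXES, PySem.Set.ofList, PySem.Set.contains,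
                PySem.Set.add, PySem.Dict.get?, h2]
    · simp only [collapse_keystrokes_go, collapse_keystrokes_alt_go, KEYSTROKE_TREE, COMMANDS,
                 PREFIXES]
      by_cases e1 : "enter" = k <;> by_cases e2 : "backspace" = k <;>
        by_cases e3 : "ctrl h" = k <;> by_cases e4 : "ctrl e" = k <;>
        by_cases e5 : "ctrl a" = k <;> by_cases e6 : "ctrl n" = k <;>
        by_cases e7 : "ctrl p" = k <;> by_cases e8 : "ctrl f" = k <;>
        by_cases e9 : "ctrl b" = k <;>
        simp_all [PySem.Set.ofList, PySem.Set.contains, PySem.Set.add, PySem.Dict.get?]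
      intro h
      exact absurd h.symm h1
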